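-- pv_equiv track=rewrite | github.com/slimissa/CAGOULE | cagoule/matrix.py | _vandermonde_matrix
-- ===== SOURCE A (Python) =====
-- Matrix = list[list[int]]
--
-- def _vandermonde_matrix(nodes: list[int], p: int) -> Matrix:
--     n = len(nodes)
--     m = []
--     for i in range(n):
--         row = []
--         alpha = nodes[i] % p
--         power = 1
--         for j in range(n):
--             row.append(power)
--             power = power * alpha % p
--         m.append(row)
--     return m
-- ===== SOURCE B (Python) =====
-- def _vandermonde_matrix(nodes: list[int], p: int) -> list[list[int]]:
--     # Column-major: keep a running vector of each node's current power,
--     # snapshot it once per column, then transpose the columns into rows.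
--     n = len(nodes)
--     alphas = [x % p for x in nodes]
--     cols = []
--     powers = [1] * n
--     for _ in range(n):
--         cols.append(powers)
--         powers = [pw * a % p for pw, a in zip(powers, alphas)]
--     return [list(row) for row in zip(*cols)]
-- ===== Notes on version B (the rewrite author's own statement) =====
-- stated objective: alternative
-- what changed: B builds the matrix column by column, maintaining a length-n vector of current powers updated by one vectorized multiply-mod per column, then transposes the column snapshots into rows via zip(*cols); A builds each row independently with a scalar power accumulator in nested loops. The trade: B pays an extra O(n^2) transpose pass, so it is not faster.
import Mathlib
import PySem

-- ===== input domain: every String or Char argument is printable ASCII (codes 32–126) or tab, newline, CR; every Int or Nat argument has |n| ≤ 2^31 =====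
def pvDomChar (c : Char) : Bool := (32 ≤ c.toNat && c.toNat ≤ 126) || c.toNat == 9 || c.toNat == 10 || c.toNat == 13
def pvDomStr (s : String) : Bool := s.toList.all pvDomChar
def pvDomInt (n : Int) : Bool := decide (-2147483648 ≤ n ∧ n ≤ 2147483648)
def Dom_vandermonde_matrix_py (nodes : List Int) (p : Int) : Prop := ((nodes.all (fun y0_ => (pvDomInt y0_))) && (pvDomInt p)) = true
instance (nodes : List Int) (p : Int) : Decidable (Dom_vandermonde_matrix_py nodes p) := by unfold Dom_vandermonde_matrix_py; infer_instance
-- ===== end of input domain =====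

-- B builds the matrix column-major with a persistent power vector and a final transpose,
-- instead of A's row-major scalar accumulator; alternative decomposition, same O(n^2) cost
-- (the transpose is an extra pass, so B is not faster).

-- ===== PORT A =====
def vandermonde_matrix_py (nodes : List Int) (p : Int) : List (List Int) :=
  let n := nodes.length
  nodes.foldl (fun m x =>
    let alpha := PySem.Int.mod x p
    let rp := (List.range n).foldl
      (fun (rp : List Int × Int) _ => (rp.1 ++ [rp.2], PySem.Int.mod (rp.2 * alpha) p))
      ([], 1)
    m ++ [rp.1]) []

-- ===== PORT B =====
-- powers update for one column: [pw * a % p for pw, a in zip(powers, alphas)]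
def pvStepVec (p : Int) (alphas powers : List Int) : List Int :=
  List.zipWith (fun pw a => PySem.Int.mod (pw * a) p) powers alphas

-- the loop collecting the column snapshots
def pvSnap (p : Int) (alphas : List Int) : Nat → List Int → List (List Int)
  | 0, _ => []
  | k+1, powers => powers :: pvSnap p alphas k (pvStepVec p alphas powers)

-- hand port of zip(*cols): emit rows until the shortest column is exhausted (exact for lists)
def pvZipStar (cols : List (List Int)) : List (List Int) :=
  match cols with
  | [] => []
  | c :: rest =>
    if (c :: rest).any (·.isEmpty) then []
    else ((c :: rest).map (·.headD 0)) :: pvZipStar ((c :: rest).map (·.tail))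
termination_by (cols.headD []).length
decreasing_by
  simp_all
  cases c with
  | nil => simp_all
  | cons h t => simp

def vandermonde_matrix_py_alt (nodes : List Int) (p : Int) : List (List Int) :=
  let n := nodes.length
  let alphas := nodes.map (fun x => PySem.Int.mod x p)
  pvZipStar (pvSnap p alphas n (List.replicate n 1))

-- ===== PRECONDITION & SPEC =====
-- Pre_ excludes exactly the inputs where Python raises ZeroDivisionError: p = 0 with at
-- least one node (the body computes nodes[i] % 0); nodes = [] returns [] even for p = 0.
def Pre_vandermonde_matrix_py (nodes : List Int) (p : Int) : Prop := nodes = [] ∨ p ≠ 0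
instance (nodes : List Int) (p : Int) : Decidable (Pre_vandermonde_matrix_py nodes p) := by unfold Pre_vandermonde_matrix_py; infer_instance

def pvWitness_vandermonde_matrix_py : List Int × Int := ([2, 3], 5)

def Spec_vandermonde_matrix_py (nodes : List Int) (p : Int) (out : List (List Int)) : Prop := out = vandermonde_matrix_py_alt nodes p
instance (nodes : List Int) (p : Int) (out : List (List Int)) : Decidable (Spec_vandermonde_matrix_py nodes p out) := by unfold Spec_vandermonde_matrix_py; infer_instance

-- ===== CLAIM (what is proved, stated in full; the proofs are below) =====
def Claim_equal_vandermonde_matrix_py : Prop := ∀ (nodes : List Int) (p : Int), Dom_vandermonde_matrix_py nodes p → Pre_vandermonde_matrix_py nodes p → Spec_vandermonde_matrix_py nodes p (vandermonde_matrix_py nodes p)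

-- ===== LEMMAS AND PROOFS =====

-- scalar row builder (what A's inner loop emits) and the power left over after k steps
def rowGo (p a : Int) : Nat → Int → List Int
  | 0, _ => []
  | k+1, pw => pw :: rowGo p a k (PySem.Int.mod (pw * a) p)

def powK (p a : Int) : Nat → Int → Int
  | 0, pw => pw
  | k+1, pw => powK p a k (PySem.Int.mod (pw * a) p)

theorem rowGo_snoc (p a : Int) (k : Nat) : ∀ pw,
    rowGo p a (k+1) pw = rowGo p a k pw ++ [powK p a k pw] := by
  induction k with
  | zero => intro pw; simp [rowGo, powK]
  | succ k ih =>
    intro pw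
    have h := ih (PySem.Int.mod (pw * a) p)
    simp only [rowGo] at h
    simp only [rowGo, powK, List.cons_append, h]

theorem powK_snoc (p a : Int) (k : Nat) : ∀ pw,
    powK p a (k+1) pw = PySem.Int.mod (powK p a k pw * a) p := by
  induction k with
  | zero => intro pw; simp [powK]
  | succ k ih =>
    intro pw
    have h := ih (PySem.Int.mod (pw * a) p)
    simp only [powK] at h ⊢
    exact h

theorem innerFoldl (p a : Int) (k : Nat) : ∀ (row : List Int) (pw : Int),
    (List.range k).foldl
      (fun (rp : List Int × Int) _ => (rp.1 ++ [rp.2], PySem.Int.mod (rp.2 * a) p))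
      (row, pw) = (row ++ rowGo p a k pw, powK p a k pw) := by
  induction k with
  | zero => intro row pw; simp [rowGo, powK]
  | succ k ih =>
    intro row pw
    rw [List.range_succ, List.foldl_append, ih]
    simp only [List.foldl_cons, List.foldl_nil, rowGo_snoc, powK_snoc, List.append_assoc]

theorem snap_len (p : Int) (alphas : List Int) (k : Nat) : ∀ powers l,
    powers.length = alphas.length → l ∈ pvSnap p alphas k powers → l.length = alphas.length := by
  induction k with
  | zero => intro powers l _ h; simp [pvSnap] at h
  | succ k ih =>
    intro powers l hlen h
    simp only [pvSnap, List.mem_cons] at h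
    rcases h with h | h
    · simpa [h] using hlen
    · exact ih _ _ (by simp [pvStepVec, hlen]) h

theorem zipStar_singleton (c : List Int) : pvZipStar [c] = c.map (fun x => [x]) := by
  induction c with
  | nil => simp [pvZipStar]
  | cons h t ih => rw [pvZipStar]; simp [ih]

theorem zipStar_cons (c : List Int) : ∀ (L : List (List Int)), L ≠ [] →
    (∀ l ∈ L, l.length = c.length) →
    pvZipStar (c :: L) = List.zipWith List.cons c (pvZipStar L) := by
  induction c with
  | nil =>
    intro L _ _
    rw [pvZipStar]; simp
  | cons x c ih =>
    intro L hne hlen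
    cases L with
    | nil => exact absurd rfl hne
    | cons l0 L' =>
      have key : ∀ l ∈ (x::c) :: l0 :: L', l.isEmpty = false := by
        intro l hl
        have hlen' : l.length = c.length + 1 := by
          rcases List.mem_cons.1 hl with h | h
          · subst h; simp
          · simpa using hlen l h
        cases l with
        | nil => simp at hlen'
        | cons _ _ => simp
      have hA : ((x::c) :: l0 :: L').any (·.isEmpty) = false :=
        List.any_eq_false.2 (fun l hl => by simp [key l hl])
      have hB : ((l0 :: L').any (·.isEmpty)) = false :=
        List.any_eq_false.2 (fun l hl => by simp [key l (List.mem_cons_of_mem _ hl)])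
      rw [pvZipStar, hA]
      conv_rhs => rw [pvZipStar, hB]
      simp only [Bool.false_eq_true, if_false, List.map_cons, List.zipWith_cons_cons]
      refine congrArg _ ?_
      simp only [List.tail_cons]
      rw [ih (l0.tail :: L'.map (·.tail)) (by simp) ?_]
      intro l hl
      rcases List.mem_cons.1 hl with h | h
      · have : l0.length = c.length + 1 := by simpa using hlen l0 (by simp)
        subst h; simp [List.length_tail, this]
      · rcases List.mem_map.1 h with ⟨l', hl', rfl⟩
        have : l'.length = c.length + 1 := by simpa using hlen l' (List.mem_cons_of_mem _ hl')
        simp [List.length_tail, this]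

theorem zipWith_three (p : Int) (g : Int → Int → List Int) : ∀ (ps alphas : List Int),
    List.zipWith List.cons ps (List.zipWith g (pvStepVec p alphas ps) alphas)
      = List.zipWith (fun pw a => pw :: g (PySem.Int.mod (pw * a) p) a) ps alphas := by
  intro ps
  induction ps with
  | nil => intro alphas; simp [pvStepVec]
  | cons x t ih =>
    intro alphas
    cases alphas with
    | nil => simp [pvStepVec]
    | cons a as => simp [pvStepVec] at ih ⊢; exact ih as

theorem snap_main (p : Int) (alphas : List Int) (k : Nat) : ∀ (ps : List Int),
    ps.length = alphas.length →
    pvZipStar (pvSnap p alphas (k+1) ps)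
      = List.zipWith (fun pw a => rowGo p a (k+1) pw) ps alphas := by
  induction k with
  | zero =>
    intro ps hlen
    rw [pvSnap, pvSnap, zipStar_singleton]
    induction ps generalizing alphas with
    | nil => simp
    | cons x t iht =>
      cases alphas with
      | nil => simp at hlen
      | cons a as =>
        simp only [List.map_cons, List.zipWith_cons_cons, rowGo]
        rw [iht as (by simpa using hlen)]
        simp [rowGo]
  | succ k ih =>
    intro ps hlen
    rw [pvSnap]
    cases ps with
    | nil =>
      have : alphas = [] := by cases alphas <;> simp_all
      subst this
      rw [pvZipStar]; simp [pvSnap]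
    | cons x t =>
      rw [zipStar_cons _ _ (by simp [pvSnap]) ?hl]
      · rw [ih _ (by simp [pvStepVec, hlen])]
        rw [zipWith_three]
        rfl
      case hl =>
        intro l hl
        have := snap_len p alphas (k+1) (pvStepVec p alphas (x :: t)) l
          (by simp [pvStepVec, hlen]) hl
        simp [this, hlen]

theorem zipWith_replicate (f : Int → Int → List Int) (c : Int) : ∀ (xs : List Int),
    List.zipWith f (List.replicate xs.length c) xs = xs.map (f c) := by
  intro xs
  induction xs with
  | nil => simp
  | cons x t ih => simp [List.replicate, ih]

-- ===== VERDICT (by name: the statement is the Claim_ definition above) =====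
theorem vandermonde_matrix_py_spec : Claim_equal_vandermonde_matrix_py := by
  intro nodes p _ _
  unfold Spec_vandermonde_matrix_py vandermonde_matrix_py vandermonde_matrix_py_alt
  simp only
  rw [PySem.List.foldl_append_singleton_eq_map]
  rw [List.map_congr_left (g := fun x => rowGo p (PySem.Int.mod x p) nodes.length 1)
    (fun x _ => by simp only; rw [innerFoldl]; simp)]
  cases nodes with
  | nil => simp [pvSnap, pvZipStar]
  | cons y t =>
    simp only [List.length_cons]
    rw [snap_main p ((y :: t).map (fun x => PySem.Int.mod x p)) t.length
      (List.replicate (t.length + 1) 1) (by simp)]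
    have hrep : t.length + 1 = ((y :: t).map (fun x => PySem.Int.mod x p)).length := by simp
    rw [hrep, zipWith_replicate, List.map_map]
    rfl
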